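-- pv_equiv track=rewrite | github.com/David-5-5/tutorial | python/algo/leecode2/algo2945.py | findMaximumLength3
-- ===== SOURCE A (Python) =====
-- from collections import deque
-- from itertools import accumulate
-- from typing import List
--
-- def findMaximumLength3(nums: List[int]) -> int:
--     n = len(nums)
--     q = deque()
--     q.append((0,0,0))
--     presum = list(accumulate(nums, initial=0))
--     for i in range(1, n+1):
--         while len(q) > 1 and presum[q[1][2]] + q[1][1] <= presum[i]:
--             q.popleft()
--
--         cnt ,last = q[0][0]+1, presum[i]-presum[q[0][2]]
--
--         while q and presum[q[-1][2]] + q[-1][1] >= presum[i] + last: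
--              q.pop()
--
--         q.append((cnt ,last, i))
--
--     return q[-1][0]
-- ===== SOURCE B (Python) =====
-- def findMaximumLength3(nums):
--     n = len(nums)
--     pre = [0]
--     for x in nums:
--         pre.append(pre[-1] + x)
--     cnt = [0]
--     K = [0]          # K[j] = prefix-sum at j + last-segment sum of the best partition ending at j
--     lo = 0           # front boundary: candidates below lo are permanently discarded
--     for i in range(1, n + 1):
--         # frontier: strict suffix minima of K[lo..i-1], in increasing index order
--         fr = []
--         for j in range(i - 1, lo - 1, -1):
--             if not fr or K[j] < K[fr[0]]:
--                 fr.insert(0, j)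
--         valid = [j for j in fr if K[j] <= pre[i]]
--         f = valid[-1] if valid else fr[0]
--         lo = f
--         cnt.append(cnt[f] + 1)
--         K.append(2 * pre[i] - pre[f])
--     return cnt[n]
-- ===== Notes on version B (the rewrite author's own statement) =====
-- stated objective: alternative
-- what changed: Replaces the incrementally maintained monotonic deque by explicit per-index cnt/key arrays with a front pointer, recomputing the candidate frontier (the strict suffix minima of the key array above the pointer) from scratch at every step.
import Mathlib
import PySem

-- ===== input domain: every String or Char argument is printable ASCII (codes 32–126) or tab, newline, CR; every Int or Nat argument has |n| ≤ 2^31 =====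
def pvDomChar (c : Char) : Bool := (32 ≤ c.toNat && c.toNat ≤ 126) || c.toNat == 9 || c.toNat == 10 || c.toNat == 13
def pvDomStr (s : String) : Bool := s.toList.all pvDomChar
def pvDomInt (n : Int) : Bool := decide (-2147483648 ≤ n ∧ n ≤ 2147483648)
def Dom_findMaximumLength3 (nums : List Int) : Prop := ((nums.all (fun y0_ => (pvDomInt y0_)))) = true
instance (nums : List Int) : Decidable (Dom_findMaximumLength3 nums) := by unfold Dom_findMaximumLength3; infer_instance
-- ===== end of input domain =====

-- B replaces A's incrementally maintained monotonic deque by per-index cnt/key arrays with a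
-- front pointer, recomputing the candidate frontier (strict suffix minima of the key array)
-- from scratch at every step; same return value, no speed claim.


-- ===== PORT A =====
-- deque entry: (cnt, last, idx).  All list indices A reads are in range by construction,
-- so `getD` is exact (Python raises nowhere here).
-- `while len(q) > 1 and presum[q[1][2]] + q[1][1] <= presum[i]: q.popleft()`
def pvPopFront (p : Int) (presum : List Int) : List (Int × Int × Nat) → List (Int × Int × Nat)
  | a :: b :: rest =>
    if presum.getD b.2.2 0 + b.2.1 ≤ p then pvPopFront p presum (b :: rest) else a :: b :: rest
  | q => q

-- `while q and presum[q[-1][2]] + q[-1][1] >= thr: q.pop()` acting on the REVERSED deque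
-- (popping from the back = dropping from the front of the reversal; exact).
def pvPopBackRev (thr : Int) (presum : List Int) : List (Int × Int × Nat) → List (Int × Int × Nat)
  | [] => []
  | t :: rest => if presum.getD t.2.2 0 + t.2.1 ≥ thr then pvPopBackRev thr presum rest else t :: rest

-- the body of A's `for i in range(1, n+1)` loop
def pvStepA (presum : List Int) (q : List (Int × Int × Nat)) (i : Nat) : List (Int × Int × Nat) :=
  let q1 := pvPopFront (presum.getD i 0) presum q
  let hd := q1.headD (0, 0, 0)            -- q[0]; q is never empty in Python
  let cnt := hd.1 + 1
  let last := presum.getD i 0 - presum.getD hd.2.2 0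
  let q2 := (pvPopBackRev (presum.getD i 0 + last) presum q1.reverse).reverse
  q2 ++ [(cnt, last, i)]

def findMaximumLength3 (nums : List Int) : Int :=
  let n := nums.length
  let presum := nums.scanl (· + ·) 0      -- list(accumulate(nums, initial=0))
  let q := (List.range' 1 n 1).foldl (pvStepA presum) [((0 : Int), (0 : Int), (0 : Nat))]
  (q.getLastD (0, 0, 0)).1                -- q[-1][0]; q is never empty

-- ===== PORT B =====
-- state: (cnt, K, lo).  `fr[0]` / `valid[-1]` are read only when nonempty in Python,
-- so the headD/getLastD defaults are never used.
def pvStepB (pre : List Int) (s : List Int × List Int × Nat) (i : Nat) : List Int × List Int × Nat :=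
  let cnt := s.1
  let K := s.2.1
  let lo := s.2.2
  -- `for j in range(i-1, lo-1, -1): if not fr or K[j] < K[fr[0]]: fr.insert(0, j)`
  let fr := ((List.range' lo (i - lo) 1).reverse).foldl (fun fr j =>
      if fr.isEmpty || K.getD j 0 < K.getD (fr.headD 0) 0 then j :: fr else fr) []
  let valid := fr.filter (fun j => K.getD j 0 ≤ pre.getD i 0)
  let f := if !valid.isEmpty then valid.getLastD 0 else fr.headD 0
  (cnt ++ [cnt.getD f 0 + 1], K ++ [2 * pre.getD i 0 - pre.getD f 0], f)

def findMaximumLength3_alt (nums : List Int) : Int :=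
  let n := nums.length
  let pre := nums.foldl (fun p x => p ++ [p.getLastD 0 + x]) [0]
  let s := (List.range' 1 n 1).foldl (pvStepB pre) ([(0 : Int)], [(0 : Int)], (0 : Nat))
  s.1.getD n 0

-- ===== PRECONDITION & SPEC =====
def Spec_findMaximumLength3 (nums : List Int) (out : Int) : Prop := out = findMaximumLength3_alt nums
instance (nums : List Int) (out : Int) : Decidable (Spec_findMaximumLength3 nums out) := by unfold Spec_findMaximumLength3; infer_instance

-- ===== CLAIM (what is proved, stated in full; the proofs are below) =====
def Claim_equal_findMaximumLength3 : Prop := ∀ (nums : List Int), Dom_findMaximumLength3 nums → Spec_findMaximumLength3 nums (findMaximumLength3 nums)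

-- ===== LEMMAS AND PROOFS =====

-- the frontier: strict suffix minima of K on positions [lo, K.length), in increasing order
def pvFrontier (K : List Int) (lo : Nat) : List Nat :=
  if h : lo < K.length then
    let rest := pvFrontier K (lo + 1)
    if rest.isEmpty || K.getD lo 0 < K.getD (rest.headD 0) 0 then lo :: rest else rest
  else []
termination_by K.length - lo

-- index-level mirror of pvPopFront
def pvFrontPop (p : Int) (K : List Int) : List Nat → List Nat
  | a :: b :: rest => if K.getD b 0 ≤ p then pvFrontPop p K (b :: rest) else a :: b :: rest
  | l => l

-- index-level mirror of pvPopBackRev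
def pvBackDrop (thr : Int) (K : List Int) : List Nat → List Nat
  | [] => []
  | j :: rest => if K.getD j 0 ≥ thr then pvBackDrop thr K rest else j :: rest

-- B's chosen front index
def pvSelect (p : Int) (K : List Int) (js : List Nat) : Nat :=
  let valid := js.filter (fun j => K.getD j 0 ≤ p)
  if !valid.isEmpty then valid.getLastD 0 else js.headD 0

-- deque entry determined by the arrays
def pvEntry (cnt K pre : List Int) (j : Nat) : Int × Int × Nat :=
  (cnt.getD j 0, K.getD j 0 - pre.getD j 0, j)

-- loop invariant: A's deque is the frontier of B's arrays above B's front pointer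
def pvInv (pre : List Int) (m : Nat) (q : List (Int × Int × Nat)) (s : List Int × List Int × Nat) : Prop :=
  s.1.length = m + 1 ∧ s.2.1.length = m + 1 ∧ s.2.2 ≤ m ∧
  q = (pvFrontier s.2.1 s.2.2).map (pvEntry s.1 s.2.1 pre)

theorem pvFrontier_ne_nil_headD (K : List Int) : ∀ lo, lo < K.length →
    pvFrontier K lo ≠ [] ∧
      ∀ t, lo ≤ t → t < K.length → K.getD ((pvFrontier K lo).headD 0) 0 ≤ K.getD t 0 := by
  suffices H : ∀ d lo, K.length - lo ≤ d → lo < K.length → pvFrontier K lo ≠ [] ∧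
      ∀ t, lo ≤ t → t < K.length → K.getD ((pvFrontier K lo).headD 0) 0 ≤ K.getD t 0 from
    fun lo h => H K.length lo (by omega) h
  intro d
  induction d with
  | zero => intro lo hle h; omega
  | succ d ih =>
    intro lo hle h
    rw [pvFrontier, dif_pos h]
    by_cases h2 : lo + 1 < K.length
    · obtain ⟨hne, hmin⟩ := ih (lo + 1) (by omega) h2
      have hie : (pvFrontier K (lo + 1)).isEmpty = false := by
        simpa [List.isEmpty_iff] using hne
      by_cases hk : K.getD lo 0 < K.getD ((pvFrontier K (lo + 1)).headD 0) 0
      · rw [if_pos (by rw [hie, Bool.false_or]; exact decide_eq_true hk)]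
        refine ⟨by simp, ?_⟩
        intro t hlt htK
        simp only [List.headD_cons]
        rcases Nat.eq_or_lt_of_le hlt with rfl | hlt'
        · exact le_refl _
        · exact le_trans (le_of_lt hk) (hmin t (by omega) htK)
      · rw [if_neg (by rw [hie, Bool.false_or, decide_eq_false hk]; exact Bool.false_ne_true)]
        refine ⟨hne, ?_⟩
        intro t hlt htK
        rcases Nat.eq_or_lt_of_le hlt with rfl | hlt'
        · exact not_lt.mp hk
        · exact hmin t (by omega) htK
    · have hrest : pvFrontier K (lo + 1) = [] := by rw [pvFrontier, dif_neg (by omega)]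
      rw [if_pos (by simp [hrest])]
      refine ⟨by simp, ?_⟩
      intro t hlt htK
      have : t = lo := by omega
      subst this; simp

theorem pvMem_frontier (K : List Int) : ∀ lo (j : Nat),
    j ∈ pvFrontier K lo ↔
      lo ≤ j ∧ j < K.length ∧ ∀ j', j < j' → j' < K.length → K.getD j 0 < K.getD j' 0 := by
  suffices H : ∀ d lo (j : Nat), K.length - lo ≤ d → (j ∈ pvFrontier K lo ↔
      lo ≤ j ∧ j < K.length ∧ ∀ j', j < j' → j' < K.length → K.getD j 0 < K.getD j' 0) from
    fun lo j => H K.length lo j (by omega)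
  intro d
  induction d with
  | zero =>
    intro lo j hle
    have hrest : pvFrontier K lo = [] := by rw [pvFrontier, dif_neg (by omega)]
    simp [hrest]; omega
  | succ d ih =>
    intro lo j hle
    by_cases h : lo < K.length
    · rw [pvFrontier, dif_pos h]
      by_cases h2 : lo + 1 < K.length
      · obtain ⟨hne, hmin⟩ := pvFrontier_ne_nil_headD K (lo + 1) h2
        have hie : (pvFrontier K (lo + 1)).isEmpty = false := by
          simpa [List.isEmpty_iff] using hne
        have ihm : ∀ j, j ∈ pvFrontier K (lo + 1) ↔ lo + 1 ≤ j ∧ j < K.length ∧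
            ∀ j', j < j' → j' < K.length → K.getD j 0 < K.getD j' 0 :=
          fun j => ih (lo + 1) j (by omega)
        have hhead : (pvFrontier K (lo + 1)).headD 0 ∈ pvFrontier K (lo + 1) := by
          cases hc : pvFrontier K (lo + 1) with
          | nil => exact absurd hc hne
          | cons a t => simp
        by_cases hk : K.getD lo 0 < K.getD ((pvFrontier K (lo + 1)).headD 0) 0
        · rw [if_pos (by rw [hie, Bool.false_or]; exact decide_eq_true hk)]
          simp only [List.mem_cons]
          constructor
          · rintro (rfl | hj)
            · refine ⟨le_refl _, h, ?_⟩
              intro j' hlt hK'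
              exact lt_of_lt_of_le hk (hmin j' (by omega) hK')
            · obtain ⟨h1, h2', h3⟩ := (ihm j).mp hj
              exact ⟨by omega, h2', h3⟩
          · rintro ⟨h1, h2', h3⟩
            rcases Nat.eq_or_lt_of_le h1 with rfl | hlt
            · exact Or.inl rfl
            · exact Or.inr ((ihm j).mpr ⟨by omega, h2', h3⟩)
        · rw [if_neg (by rw [hie, Bool.false_or, decide_eq_false hk]; exact Bool.false_ne_true)]
          rw [ihm j]
          constructor
          · rintro ⟨h1, h2', h3⟩; exact ⟨by omega, h2', h3⟩
          · rintro ⟨h1, h2', h3⟩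
            rcases Nat.eq_or_lt_of_le h1 with rfl | hlt
            · -- j = lo would contradict hk: lo's suffix-min property forces K[lo] < K[head]
              exfalso
              obtain ⟨hh1, hh2, _⟩ := (ihm _).mp hhead
              exact hk (h3 _ (by omega) hh2)
            · exact ⟨by omega, h2', h3⟩
      · have hrest : pvFrontier K (lo + 1) = [] := by rw [pvFrontier, dif_neg (by omega)]
        rw [if_pos (by simp [hrest])]
        simp only [hrest, List.mem_cons, List.not_mem_nil, or_false]
        constructor
        · rintro rfl
          exact ⟨le_refl _, h, fun j' h1 h2' => by omega⟩
        · rintro ⟨h1, h2', _⟩; omega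
    · have hrest : pvFrontier K lo = [] := by rw [pvFrontier, dif_neg h]
      simp [hrest]; omega

theorem pvFrontier_keys_pairwise (K : List Int) : ∀ lo,
    List.Pairwise (fun a b => a < b ∧ K.getD a 0 < K.getD b 0) (pvFrontier K lo) := by
  suffices H : ∀ d lo, K.length - lo ≤ d →
      List.Pairwise (fun a b => a < b ∧ K.getD a 0 < K.getD b 0) (pvFrontier K lo) from
    fun lo => H K.length lo (by omega)
  intro d
  induction d with
  | zero =>
    intro lo hle
    by_cases h : lo < K.length
    · omega
    · rw [pvFrontier, dif_neg h]; exact List.Pairwise.nil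
  | succ d ih =>
    intro lo hle
    by_cases h : lo < K.length
    · rw [pvFrontier, dif_pos h]
      by_cases h2 : lo + 1 < K.length
      · obtain ⟨hne, hmin⟩ := pvFrontier_ne_nil_headD K (lo + 1) h2
        have hie : (pvFrontier K (lo + 1)).isEmpty = false := by
          simpa [List.isEmpty_iff] using hne
        have hpw := ih (lo + 1) (by omega)
        by_cases hk : K.getD lo 0 < K.getD ((pvFrontier K (lo + 1)).headD 0) 0
        · rw [if_pos (by rw [hie, Bool.false_or]; exact decide_eq_true hk)]
          refine List.Pairwise.cons ?_ hpw
          intro b hb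
          obtain ⟨hb1, hb2, _⟩ := (pvMem_frontier K (lo + 1) b).mp hb
          exact ⟨by omega, lt_of_lt_of_le hk (hmin b hb1 hb2)⟩
        · rw [if_neg (by rw [hie, Bool.false_or, decide_eq_false hk]; exact Bool.false_ne_true)]
          exact hpw
      · have hrest : pvFrontier K (lo + 1) = [] := by rw [pvFrontier, dif_neg (by omega)]
        rw [if_pos (by simp [hrest])]
        simp [hrest]
    · rw [pvFrontier, dif_neg h]; exact List.Pairwise.nil

theorem pvFrontier_sorted (K : List Int) (lo : Nat) :
    List.Pairwise (· < ·) (pvFrontier K lo) :=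
  (pvFrontier_keys_pairwise K lo).imp (fun h => h.1)

-- B's inner fold computes pvFrontier
theorem pvFold_eq_frontier (K : List Int) : ∀ m lo, lo + m = K.length →
    ((List.range' lo m 1).reverse).foldl (fun fr j =>
        if fr.isEmpty || K.getD j 0 < K.getD (fr.headD 0) 0 then j :: fr else fr) []
      = pvFrontier K lo := by
  intro m
  induction m with
  | zero =>
    intro lo hlo
    conv_rhs => rw [pvFrontier]
    rw [dif_neg (by omega)]
    rfl
  | succ m ih =>
    intro lo hlo
    rw [List.range'_succ, List.reverse_cons, List.foldl_append, ih (lo + 1) (by omega)]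
    simp only [List.foldl_cons, List.foldl_nil]
    conv_rhs => rw [pvFrontier]
    rw [dif_pos (by omega)]

-- strictly-sorted lists with the same members are equal
theorem pvSorted_ext (l₁ l₂ : List Nat) (h₁ : List.Pairwise (· < ·) l₁)
    (h₂ : List.Pairwise (· < ·) l₂) (h : ∀ x, x ∈ l₁ ↔ x ∈ l₂) : l₁ = l₂ := by
  have p : l₁.Perm l₂ := by
    rw [List.perm_ext_iff_of_nodup (h₁.nodup) (h₂.nodup)]
    exact h
  exact p.eq_of_pairwise (fun a b _ _ h1 h2 => le_antisymm h1 h2)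
    (h₁.imp le_of_lt) (h₂.imp le_of_lt)

-- the greatest member of a strictly-sorted list is its last element
theorem pvSorted_getLastD (l : List Nat) (x : Nat) (hs : List.Pairwise (· < ·) l)
    (hx : x ∈ l) (hmax : ∀ y ∈ l, y ≤ x) : l.getLastD 0 = x := by
  induction l with
  | nil => cases hx
  | cons a t ih =>
    cases t with
    | nil => simp at hx ⊢; omega
    | cons b r =>
      have hxt : x ∈ b :: r := by
        rcases List.mem_cons.mp hx with h | hxt
        · exact absurd (hmax b (by simp))
            (by rw [h]; simpa using (List.rel_of_pairwise_cons hs (by simp)))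
        · exact hxt
      have h2 := ih hs.tail hxt (fun y hy => hmax y (by simp [hy]))
      rw [List.getLastD_cons, List.getLastD_cons]
      rw [List.getLastD_cons] at h2
      exact h2

-- the least member of a strictly-sorted list is its head
theorem pvSorted_headD (l : List Nat) (x : Nat) (hs : List.Pairwise (· < ·) l)
    (hx : x ∈ l) (hmin : ∀ y ∈ l, x ≤ y) : l.headD 0 = x := by
  cases l with
  | nil => cases hx
  | cons a t =>
    rcases List.mem_cons.mp hx with h | hxt
    · rw [h]; rfl
    · exact absurd (hmin a (by simp)) (by simpa using (List.rel_of_pairwise_cons hs hxt))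

theorem pvPopFront_map (p : Int) (cnt K pre : List Int) : ∀ js : List Nat,
    pvPopFront p pre (js.map (pvEntry cnt K pre)) = (pvFrontPop p K js).map (pvEntry cnt K pre) := by
  intro js
  induction js with
  | nil => rfl
  | cons a t ih =>
    cases t with
    | nil => rfl
    | cons b r =>
      simp only [List.map_cons]
      rw [pvPopFront, pvFrontPop]
      have hb : pre.getD (pvEntry cnt K pre b).2.2 0 + (pvEntry cnt K pre b).2.1 = K.getD b 0 := by
        simp [pvEntry]
      rw [hb]
      by_cases hc : K.getD b 0 ≤ p
      · rw [if_pos hc, if_pos hc]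
        simpa using ih
      · rw [if_neg hc, if_neg hc]
        simp

theorem pvPopBackRev_map (thr : Int) (cnt K pre : List Int) : ∀ js : List Nat,
    pvPopBackRev thr pre (js.map (pvEntry cnt K pre)) = (pvBackDrop thr K js).map (pvEntry cnt K pre) := by
  intro js
  induction js with
  | nil => rfl
  | cons a t ih =>
    simp only [List.map_cons]
    rw [pvPopBackRev, pvBackDrop]
    have ha : pre.getD (pvEntry cnt K pre a).2.2 0 + (pvEntry cnt K pre a).2.1 = K.getD a 0 := by
      simp [pvEntry]
    rw [ha]
    by_cases hc : K.getD a 0 ≥ thr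
    · rw [if_pos hc, if_pos hc]
      simpa using ih
    · rw [if_neg hc, if_neg hc]
      simp

theorem pvSelect_mem (p : Int) (K : List Int) (js : List Nat) (h : js ≠ []) :
    pvSelect p K js ∈ js := by
  unfold pvSelect
  by_cases hv : (js.filter (fun j => K.getD j 0 ≤ p)).isEmpty
  · simp only [hv, Bool.not_true, if_neg Bool.false_ne_true]
    cases js with
    | nil => exact absurd rfl h
    | cons a t => simp
  · rw [Bool.not_eq_true] at hv
    simp only [hv, Bool.not_false]
    have hne : js.filter (fun j => K.getD j 0 ≤ p) ≠ [] := by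
      simpa [List.isEmpty_iff] using hv
    have : (js.filter (fun j => K.getD j 0 ≤ p)).getLastD 0
        ∈ js.filter (fun j => K.getD j 0 ≤ p) := by
      rw [List.getLastD_eq_getLast?, List.getLast?_eq_some_getLast hne]
      exact List.getLast_mem hne
    exact List.mem_of_mem_filter this

theorem pvFrontPop_eq_filter (p : Int) (K : List Int) : ∀ js : List Nat,
    List.Pairwise (fun a b => a < b ∧ K.getD a 0 < K.getD b 0) js →
    pvFrontPop p K js = js.filter (fun j => pvSelect p K js ≤ j) := by
  have gi : ∀ (l : List Nat) (d : Nat), l ≠ [] → l.getLastD d = l.getLastD 0 := by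
    intro l d hl
    rw [List.getLastD_eq_getLast?, List.getLastD_eq_getLast?, List.getLast?_eq_some_getLast hl]
    rfl
  intro js
  induction js with
  | nil => intro _; rfl
  | cons a t ih =>
    intro hpw
    cases t with
    | nil =>
      have h1 : pvFrontPop p K [a] = [a] := rfl
      have hsel : pvSelect p K [a] = a := by
        unfold pvSelect
        rw [List.filter_cons]
        by_cases hk : K.getD a 0 ≤ p
        · rw [if_pos (decide_eq_true hk)]; simp
        · rw [decide_eq_false hk, if_neg (show ¬((false : Bool) = true) from Bool.false_ne_true)]
          simp
      rw [h1, hsel]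
      simp
    | cons b r =>
      have pa : ∀ x ∈ b :: r, a < x ∧ K.getD a 0 < K.getD x 0 :=
        fun x hx => List.rel_of_pairwise_cons hpw hx
      have hpt := hpw.tail
      rw [pvFrontPop]
      by_cases hb : K.getD b 0 ≤ p
      · rw [if_pos hb, ih hpt]
        have hvb : (b :: r).filter (fun j => K.getD j 0 ≤ p) ≠ [] := by
          intro hemp
          have : b ∈ (b :: r).filter (fun j => K.getD j 0 ≤ p) :=
            List.mem_filter.mpr ⟨by simp, by simpa using hb⟩
          rw [hemp] at this; cases this
        have hsel : pvSelect p K (a :: b :: r) = pvSelect p K (b :: r) := by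
          unfold pvSelect
          rw [List.filter_cons]
          set vt := (b :: r).filter (fun j => K.getD j 0 ≤ p) with hvt
          have hie : (!vt.isEmpty) = true := by simpa using hvb
          by_cases dc : K.getD a 0 ≤ p
          · rw [if_pos (decide_eq_true dc)]
            rw [if_pos (show (!(a :: vt).isEmpty) = true by simp), if_pos hie]
            rw [List.getLastD_cons]
            exact gi _ _ (by simpa using hvb)
          · rw [decide_eq_false dc, if_neg (show ¬((false : Bool) = true) from Bool.false_ne_true)]
            simp [hie]
        rw [hsel]
        have hselmem : pvSelect p K (b :: r) ∈ b :: r := pvSelect_mem p K _ (by simp)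
        have haless : a < pvSelect p K (b :: r) := (pa _ hselmem).1
        conv_rhs => rw [List.filter_cons]
        rw [if_neg (by simpa using Nat.not_le.mpr haless)]
      · rw [if_neg hb]
        have hvnil : (b :: r).filter (fun j => K.getD j 0 ≤ p) = [] := by
          rw [List.filter_eq_nil_iff]
          intro x hx
          rcases List.mem_cons.mp hx with h | hxr
          · rw [h]; simpa using hb
          · have h2 := (List.rel_of_pairwise_cons hpt hxr).2
            simp only [decide_eq_true_eq]
            omega
        have hsel : pvSelect p K (a :: b :: r) = a := by
          unfold pvSelect
          rw [List.filter_cons, hvnil]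
          by_cases ha : K.getD a 0 ≤ p
          · rw [if_pos (decide_eq_true ha)]; simp
          · rw [decide_eq_false ha, if_neg (show ¬((false : Bool) = true) from Bool.false_ne_true)]
            simp
        rw [hsel]
        symm
        rw [List.filter_eq_self]
        intro x hx
        rcases List.mem_cons.mp hx with h | hxr
        · rw [h]; simp
        · simpa using le_of_lt (pa x hxr).1

theorem pvBackDrop_eq_filter (thr : Int) (K : List Int) : ∀ js : List Nat,
    List.Pairwise (fun a b => K.getD b 0 ≤ K.getD a 0) js →
    pvBackDrop thr K js = js.filter (fun j => K.getD j 0 < thr) := by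
  intro js
  induction js with
  | nil => intro _; rfl
  | cons j r ih =>
    intro hpw
    rw [pvBackDrop]
    by_cases hc : K.getD j 0 ≥ thr
    · rw [if_pos hc, ih hpw.tail, List.filter_cons, if_neg (by simpa using not_lt.mpr hc)]
    · rw [if_neg hc, List.filter_cons, if_pos (by simpa using not_le.mp hc)]
      congr 1
      symm
      rw [List.filter_eq_self]
      intro x hx
      have h2 := List.rel_of_pairwise_cons hpw hx
      simp only [decide_eq_true_eq]
      omega

-- restricting the frontier to a member f gives the frontier from f
theorem pvFrontier_from_mem (K : List Int) (lo f : Nat) (hf : f ∈ pvFrontier K lo) :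
    pvFrontier K f = (pvFrontier K lo).filter (fun j => f ≤ j) := by
  obtain ⟨hf1, hf2, hf3⟩ := (pvMem_frontier K lo f).mp hf
  apply pvSorted_ext _ _ (pvFrontier_sorted K f) ((pvFrontier_sorted K lo).filter _)
  intro x
  rw [List.mem_filter, pvMem_frontier, pvMem_frontier]
  constructor
  · rintro ⟨h1, h2, h3⟩
    exact ⟨⟨by omega, h2, h3⟩, by simpa using h1⟩
  · rintro ⟨⟨h1, h2, h3⟩, h4⟩
    exact ⟨by simpa using h4, h2, h3⟩

-- appending a key: the new frontier is the old one cut below the new key, plus the new index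
theorem pvFrontier_append (K : List Int) (k : Int) (f : Nat) (hf : f < K.length) :
    pvFrontier (K ++ [k]) f
      = (pvFrontier K f).filter (fun j => K.getD j 0 < k) ++ [K.length] := by
  have hget : ∀ j, j < K.length → (K ++ [k]).getD j 0 = K.getD j 0 :=
    fun j hj => List.getD_append K [k] 0 j hj
  have hgetL : (K ++ [k]).getD K.length 0 = k := by
    rw [List.getD_append_right K [k] 0 K.length (le_refl _)]
    simp
  have hlen : (K ++ [k]).length = K.length + 1 := by simp
  apply pvSorted_ext _ _ (pvFrontier_sorted _ f)
  · rw [List.pairwise_append]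
    refine ⟨(pvFrontier_sorted K f).filter _, by simp, ?_⟩
    intro a ha b hb
    simp only [List.mem_singleton] at hb
    subst hb
    exact ((pvMem_frontier K f a).mp (List.mem_of_mem_filter ha)).2.1
  · intro x
    rw [pvMem_frontier, List.mem_append, List.mem_filter, pvMem_frontier]
    constructor
    · rintro ⟨h1, h2, h3⟩
      rw [hlen] at h2
      by_cases hx : x = K.length
      · exact Or.inr (by simp [hx])
      · have hxlt : x < K.length := by omega
        refine Or.inl ⟨⟨h1, hxlt, ?_⟩, ?_⟩
        · intro j' hj1 hj2
          have := h3 j' hj1 (by omega)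
          rwa [hget x hxlt, hget j' hj2] at this
        · have := h3 K.length hxlt (by omega)
          rw [hget x hxlt, hgetL] at this
          simpa using this
    · rintro (⟨⟨h1, h2, h3⟩, h4⟩ | hx)
      · refine ⟨h1, by omega, ?_⟩
        intro j' hj1 hj2
        rw [hlen] at hj2
        rw [hget x h2]
        by_cases hj : j' = K.length
        · rw [hj, hgetL]
          simpa using h4
        · rw [hget j' (by omega)]
          exact h3 j' hj1 (by omega)
      · simp only [List.mem_singleton] at hx
        subst hx
        refine ⟨le_of_lt hf, by omega, ?_⟩
        intro j' hj1 hj2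
        omega

-- B's prefix-sum loop builds the scanl A uses
theorem pvPre_eq_scanl (nums : List Int) :
    nums.foldl (fun p x => p ++ [p.getLastD 0 + x]) [0] = nums.scanl (· + ·) 0 := by
  have H : ∀ (l : List Int) (acc : List Int) (a : Int),
      l.foldl (fun p x => p ++ [p.getLastD 0 + x]) (acc ++ [a]) = acc ++ l.scanl (· + ·) a := by
    intro l
    induction l with
    | nil => intro acc a; simp [List.scanl_nil]
    | cons x t ih =>
      intro acc a
      rw [List.foldl_cons, List.scanl_cons]
      have hlast : (acc ++ [a]).getLastD 0 = a := List.getLastD_concat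
      rw [hlast]
      rw [ih (acc ++ [a]) (a + x)]
      simp
  have := H nums [] 0
  simpa using this

theorem pvStep_inv (pre : List Int) (m : Nat) (q : List (Int × Int × Nat))
    (s : List Int × List Int × Nat) (h : pvInv pre m q s) :
    pvInv pre (m + 1) (pvStepA pre q (m + 1)) (pvStepB pre s (m + 1)) := by
  obtain ⟨cnt, K, lo⟩ := s
  obtain ⟨hclen, hKlen, hlo, hq⟩ := h
  simp only at hclen hKlen hlo hq
  have hloK : lo < K.length := by omega
  have hfr : ((List.range' lo (m + 1 - lo) 1).reverse).foldl (fun fr j =>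
      if fr.isEmpty || K.getD j 0 < K.getD (fr.headD 0) 0 then j :: fr else fr) [] = pvFrontier K lo :=
    pvFold_eq_frontier K (m + 1 - lo) lo (by omega)
  set p := pre.getD (m + 1) 0 with hp
  set f := pvSelect p K (pvFrontier K lo) with hfdef
  set k := 2 * p - pre.getD f 0 with hk
  have hB : pvStepB pre (cnt, K, lo) (m + 1) = (cnt ++ [cnt.getD f 0 + 1], K ++ [k], f) := by
    unfold pvStepB
    simp only
    rw [hfr]
    rfl
  have hne := (pvFrontier_ne_nil_headD K lo hloK).1
  have hfmem : f ∈ pvFrontier K lo := hfdef ▸ pvSelect_mem p K _ hne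
  obtain ⟨hf1, hf2, hf3⟩ := (pvMem_frontier K lo f).mp hfmem
  have hkeys := pvFrontier_keys_pairwise K lo
  have h1 : pvPopFront p pre q = (pvFrontier K f).map (pvEntry cnt K pre) := by
    rw [hq, pvPopFront_map, pvFrontPop_eq_filter p K _ hkeys, ← hfdef,
      ← pvFrontier_from_mem K lo f hfmem]
  have hmemff : f ∈ pvFrontier K f := (pvMem_frontier K f f).mpr ⟨le_refl _, hf2, hf3⟩
  have hheadf : (pvFrontier K f).headD 0 = f :=
    pvSorted_headD _ f (pvFrontier_sorted K f) hmemff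
      (fun y hy => ((pvMem_frontier K f y).mp hy).1)
  have hnef := (pvFrontier_ne_nil_headD K f hf2).1
  have hhd : (pvPopFront p pre q).headD (0, 0, 0) = pvEntry cnt K pre f := by
    rw [h1]
    cases hfc : pvFrontier K f with
    | nil => exact absurd hfc hnef
    | cons y ys =>
      have hy : y = f := by simpa [hfc] using hheadf
      simp [hy]
  have hkeysf' : List.Pairwise (fun a b => K.getD b 0 ≤ K.getD a 0) (pvFrontier K f).reverse :=
    List.pairwise_reverse.mpr ((pvFrontier_keys_pairwise K f).imp (fun h => le_of_lt h.2))
  have h2 : (pvPopBackRev (p + (p - pre.getD f 0)) pre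
        (((pvFrontier K f).map (pvEntry cnt K pre)).reverse)).reverse
      = ((pvFrontier K f).filter
          (fun j => K.getD j 0 < p + (p - pre.getD f 0))).map (pvEntry cnt K pre) := by
    rw [← List.map_reverse, pvPopBackRev_map, pvBackDrop_eq_filter _ _ _ hkeysf',
      List.filter_reverse]
    rw [List.map_reverse, List.reverse_reverse]
  have hthr : p + (p - pre.getD f 0) = k := by rw [hk]; omega
  have hA : pvStepA pre q (m + 1)
      = ((pvFrontier K f).filter (fun j => K.getD j 0 < k)).map (pvEntry cnt K pre)
        ++ [(cnt.getD f 0 + 1, p - pre.getD f 0, m + 1)] := by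
    unfold pvStepA
    simp only
    rw [← hp, hhd, h1]
    simp only [pvEntry]
    rw [h2, hthr]
  rw [hA, hB]
  refine ⟨by simp [hclen], by simp [hKlen], by simp only; omega, ?_⟩
  simp only
  rw [pvFrontier_append K k f (by omega), List.map_append]
  congr 1
  · apply List.map_congr_left
    intro j hj
    have hjlt : j < K.length := ((pvMem_frontier K f j).mp (List.mem_of_mem_filter hj)).2.1
    unfold pvEntry
    rw [List.getD_append _ _ _ _ (by omega), List.getD_append _ _ _ _ (by omega)]
  · simp only [List.map_cons, List.map_nil]
    unfold pvEntry
    have e1 : (cnt ++ [cnt.getD f 0 + 1]).getD K.length 0 = cnt.getD f 0 + 1 := by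
      rw [List.getD_append_right _ _ _ _ (by omega)]
      simp [hclen, hKlen]
    have e2 : (K ++ [k]).getD K.length 0 = k := by
      rw [List.getD_append_right _ _ _ _ (by omega)]
      simp
    rw [e1, e2, hKlen]
    rw [← hp, hk]
    have harith : 2 * p - pre.getD f 0 - p = p - pre.getD f 0 := by ring
    rw [harith]

theorem pvLoop_inv (pre : List Int) (h0 : pre.getD 0 0 = 0) : ∀ m,
    pvInv pre m ((List.range' 1 m 1).foldl (pvStepA pre) [((0 : Int), (0 : Int), (0 : Nat))])
      ((List.range' 1 m 1).foldl (pvStepB pre) ([(0 : Int)], [(0 : Int)], (0 : Nat))) := by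
  intro m
  induction m with
  | zero =>
    refine ⟨rfl, rfl, le_refl _, ?_⟩
    have h1 : pvFrontier [(0 : Int)] 1 = [] := by rw [pvFrontier, dif_neg (by simp)]
    have hf0 : pvFrontier [(0 : Int)] 0 = [0] := by
      rw [pvFrontier, dif_pos (by simp)]
      simp [h1]
    simp [hf0, pvEntry]
    simpa [List.getD] using h0
  | succ m ih =>
    have hr : List.range' 1 (m + 1) 1 = List.range' 1 m 1 ++ [1 + 1 * m] := List.range'_concat
    have hm : 1 + 1 * m = m + 1 := by omega
    rw [hr, hm, List.foldl_append, List.foldl_append]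
    simp only [List.foldl_cons, List.foldl_nil]
    exact pvStep_inv pre m _ _ ih

-- ===== VERDICT (by name: the statement is the Claim_ definition above) =====
theorem findMaximumLength3_spec : Claim_equal_findMaximumLength3 := by
  intro nums _
  unfold Spec_findMaximumLength3 findMaximumLength3 findMaximumLength3_alt
  simp only
  rw [pvPre_eq_scanl]
  set pre := nums.scanl (· + ·) 0 with hpre
  have hpre0 : pre.getD 0 0 = 0 := by
    cases nums <;> simp [hpre, List.scanl_nil, List.scanl_cons]
  set n := nums.length with hn
  obtain ⟨hclen, hKlen, hlo, hq⟩ := pvLoop_inv pre hpre0 n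
  set S := (List.range' 1 n 1).foldl (pvStepB pre) ([(0 : Int)], [(0 : Int)], (0 : Nat)) with hS
  set Q := (List.range' 1 n 1).foldl (pvStepA pre) [((0 : Int), (0 : Int), (0 : Nat))] with hQ
  have hnmem : n ∈ pvFrontier S.2.1 S.2.2 :=
    (pvMem_frontier _ _ _).mpr ⟨by omega, by omega, fun j' h1 h2 => by omega⟩
  have hmax : ∀ y ∈ pvFrontier S.2.1 S.2.2, y ≤ n := by
    intro y hy
    have := ((pvMem_frontier _ _ _).mp hy).2.1
    omega
  have hlast : (pvFrontier S.2.1 S.2.2).getLastD 0 = n :=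
    pvSorted_getLastD _ n (pvFrontier_sorted _ _) hnmem hmax
  have hfne : pvFrontier S.2.1 S.2.2 ≠ [] := (pvFrontier_ne_nil_headD _ _ (by omega)).1
  have hQl : Q.getLastD (0, 0, 0) = pvEntry S.1 S.2.1 pre n := by
    rw [hq, List.getLastD_eq_getLast?, List.getLast?_map]
    cases hL : (pvFrontier S.2.1 S.2.2).getLast? with
    | none => exact absurd (List.getLast?_eq_none_iff.mp hL) hfne
    | some y =>
      have hy : y = n := by
        rw [List.getLastD_eq_getLast?, hL] at hlast
        simpa using hlast
      simp [hy, pvEntry]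
  rw [hQl]
  simp [pvEntry]
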